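-- pv_equiv track=rewrite | github.com/sarishtshreshth0/plag_extract | Project_CodeNet_Python800/p03696/s470951460.py | check_t
-- ===== SOURCE A (Python) =====
-- def check_t(A):
--     for i in range(0,len(A)):
--         if not i==len(A)-1:
--             if A[i]==")":
--                 pass
--             else:
--                 return i
--                 break
--         elif i==len(A)-1:
--             if A[i]==")":
--                 a=len(A)
--                 return a
--             else:
--                 return i
-- ===== SOURCE B (Python) =====
-- def check_t(A):
--     # leading-")" run length == index of first non-")" element (len(A) if none),
--     # computed back-to-front: ans counts the leading ")" of the suffix seen so far.
--     if not A:
--         return None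
--     ans = 0
--     for x in reversed(A):
--         ans = ans + 1 if x == ")" else 0
--     return ans
-- ===== Notes on version B (the rewrite author's own statement) =====
-- stated objective: alternative
-- what changed: Replaces A's forward index loop with early returns and a last-element special case by a reverse fold over the whole list with a resetting accumulator (ans+1 on ')', else 0), which yields the leading-')' run length = first non-')' index.
-- outside the precondition, e.g. on check_t([]): A returns None, B returns None
import Mathlib
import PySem

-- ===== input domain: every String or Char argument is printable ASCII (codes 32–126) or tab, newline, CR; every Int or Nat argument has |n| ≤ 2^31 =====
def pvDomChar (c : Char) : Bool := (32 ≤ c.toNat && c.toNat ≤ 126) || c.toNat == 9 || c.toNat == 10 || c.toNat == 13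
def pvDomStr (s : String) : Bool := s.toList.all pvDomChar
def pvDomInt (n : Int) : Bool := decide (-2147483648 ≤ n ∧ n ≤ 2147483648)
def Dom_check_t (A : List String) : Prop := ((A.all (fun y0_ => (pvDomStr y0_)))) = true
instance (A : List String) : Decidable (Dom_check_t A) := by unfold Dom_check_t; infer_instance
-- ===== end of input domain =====

-- B replaces A's forward early-exit index loop by a reverse fold with a resetting
-- accumulator computing the leading-")" run length; equal on nonempty inputs.

-- ===== PORT A =====
-- the for-loop over range(0, len(A)): returns some r on 'return r', none when the loop falls through
def checkTLoop (A : List String) : List Int → Option Int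
  | [] => none
  | i :: rest =>
    if i ≠ (A.length : Int) - 1 then
      if PySem.List.pyGet? A i = some ")" then checkTLoop A rest
      else some i
    else
      if PySem.List.pyGet? A i = some ")" then some (A.length : Int)
      else some i

def check_t (A : List String) : Int :=
  (checkTLoop A (PySem.List.pyRange 0 A.length 1)).getD 0

-- ===== PORT B =====
-- Source B's loop 'for x in reversed(A): ans = ans + 1 if x == ")" else 0' as a fold over A.reverse
def check_t_alt (A : List String) : Int :=
  A.reverse.foldl (fun ans x => if x == ")" then ans + 1 else 0) 0

-- ===== PRECONDITION & SPEC =====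
-- Pre_ excludes only the empty list, on which Python A falls through the loop and returns None (not an int).
def Pre_check_t (A : List String) : Prop := A ≠ []
instance (A : List String) : Decidable (Pre_check_t A) := by unfold Pre_check_t; infer_instance

def pvWitness_check_t : List String := [")", "x"]

def Spec_check_t (A : List String) (out : Int) : Prop := out = check_t_alt A
instance (A : List String) (out : Int) : Decidable (Spec_check_t A out) := by unfold Spec_check_t; infer_instance

-- ===== CLAIM (what is proved, stated in full; the proofs are below) =====
def Claim_equal_check_t : Prop := ∀ (A : List String), Dom_check_t A → Pre_check_t A → Spec_check_t A (check_t A)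

-- ===== LEMMAS AND PROOFS =====

-- B's reverse fold as a right fold on the original list
def leadCount (l : List String) : Int :=
  l.foldr (fun x acc => if x == ")" then acc + 1 else 0) 0

lemma check_t_alt_eq_leadCount (A : List String) : check_t_alt A = leadCount A := by
  unfold check_t_alt leadCount
  rw [List.foldl_reverse]

-- Invariant: starting A's loop at index k (k < len A) returns k plus the leading-")" count of the suffix.
lemma checkTLoop_eq (A : List String) (m k : Nat) (hm : A.length - k = m) (hk : k < A.length) :
    checkTLoop A (PySem.List.pyRange k A.length 1) =
      some ((k : Int) + leadCount (A.drop k)) := by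
  induction m generalizing k with
  | zero => omega
  | succ m ih =>
    have hcons : PySem.List.pyRange (k : Int) (A.length : Int) 1
        = (k : Int) :: PySem.List.pyRange ((k : Int) + 1) (A.length : Int) 1 :=
      PySem.List.pyRange_one_cons (by exact_mod_cast hk)
    have hget : PySem.List.pyGet? A (k : Int) = some (A[k]'hk) :=
      PySem.List.pyGet?_ofNat A k hk
    have hdrop : A.drop k = (A[k]'hk) :: A.drop (k + 1) := List.drop_eq_getElem_cons hk
    rw [hcons, hdrop]
    simp only [checkTLoop, hget, leadCount, List.foldr_cons]
    by_cases hx : A[k]'hk = ")"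
    · by_cases hlast : k = A.length - 1
      · -- last index holds ")": loop returns len(A); suffix is just [")"], count 1
        have hnil : A.drop (k + 1) = [] := List.drop_eq_nil_of_le (by omega)
        have hke : (k : Int) = (A.length : Int) - 1 := by omega
        simp [hx, hke, hnil]
      · have hk1 : k + 1 < A.length := by omega
        have hne : (k : Int) ≠ (A.length : Int) - 1 := by
          intro h; apply hlast; omega
        have ihk := ih (k + 1) (by omega) hk1
        rw [show ((k : Int) + 1) = ((k + 1 : Nat) : Int) by push_cast; ring] at *
        rw [if_pos hne, if_pos (by simp [hx])]
        rw [ihk]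
        unfold leadCount
        congr 1
        simp [hx]
        ring
    · -- head differs from ")": both sides give k
      split_ifs with h1 h2 <;> simp [hx] at *

-- ===== VERDICT (by name: the statement is the Claim_ definition above) =====
theorem check_t_spec : Claim_equal_check_t := by
  intro A _ hpre
  have hk : 0 < A.length := List.length_pos_iff.mpr hpre
  unfold Spec_check_t check_t
  rw [check_t_alt_eq_leadCount]
  have := checkTLoop_eq A A.length 0 (by omega) hk
  rw [show ((0 : Nat) : Int) = (0 : Int) by norm_num] at this
  rw [this]
  simp
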